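-- pv_equiv track=rewrite | github.com/john35452/GFG_Weekly_Coding_Contest | gfg-weekly-coding-contest-78/Array Operations.py | arrayOperations
-- ===== SOURCE A (Python) =====
-- from typing import List
--
-- def arrayOperations(n : int, arr : List[int]) -> int:
--     # code here
--     ans = 0
--     l = 0
--     for i in range(n):
--         if arr[i] == 0:
--             if i > l:
--                 ans += 1
--             l = i + 1
--     if l < n:
--         ans += 1
--     return min(ans, 2)
-- ===== SOURCE B (Python) =====
-- from typing import List
--
-- def arrayOperations(n: int, arr: List[int]) -> int:
--     # Decision procedure: skip the leading zero run; if nothing is left there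
--     # are no non-zero segments (0).  Otherwise skip the first non-zero run and
--     # the following zero run; if that exhausts the prefix there was exactly one
--     # segment (1), otherwise there are at least two (2).
--     seg = arr[:max(n, 0)]
--
--     def drop_while(pred, xs):
--         k = 0
--         while k < len(xs) and pred(xs[k]):
--             k += 1
--         return xs[k:]
--
--     t = drop_while(lambda x: x == 0, seg)
--     if not t:
--         return 0
--     t2 = drop_while(lambda x: x == 0, drop_while(lambda x: x != 0, t))
--     return 1 if not t2 else 2
-- ===== Notes on version B (the rewrite author's own statement) =====
-- stated objective: alternative
-- what changed: B replaces A's counting loop (segment counter updated at each zero plus a trailing fix-up, then capped with min) by a three-stage early-exit classification: drop the leading zero run, the first non-zero run and the next zero run of arr[:max(n,0)], and return 0/1/2 directly from which stage exhausted the prefix; no counter and no min cap exist in B.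
import Mathlib
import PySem

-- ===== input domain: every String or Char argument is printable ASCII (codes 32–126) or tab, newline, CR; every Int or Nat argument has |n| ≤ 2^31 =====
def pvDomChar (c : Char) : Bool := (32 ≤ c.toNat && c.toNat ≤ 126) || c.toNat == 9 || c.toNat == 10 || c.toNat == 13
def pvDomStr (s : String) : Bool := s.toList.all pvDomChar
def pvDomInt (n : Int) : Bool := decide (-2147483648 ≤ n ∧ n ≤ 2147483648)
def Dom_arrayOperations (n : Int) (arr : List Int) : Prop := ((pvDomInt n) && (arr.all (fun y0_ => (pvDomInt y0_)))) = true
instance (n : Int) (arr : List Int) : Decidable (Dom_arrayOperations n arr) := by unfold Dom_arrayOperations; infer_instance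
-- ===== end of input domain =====

-- B classifies the prefix directly (0/1/2) by skipping the leading zero run, the first
-- non-zero run and the next zero run, instead of A's counter-with-cap; same cost.

-- ===== PORT A =====
def arrayOperations (n : Int) (arr : List Int) : Int :=
  let s := (PySem.List.pyRange 0 n 1).foldl
    (fun (st : Int × Int) i =>
      if PySem.List.pyGetD arr i 0 == 0 then
        ((if i > st.2 then st.1 + 1 else st.1), i + 1)
      else st)
    (0, 0)
  let ans := if s.2 < n then s.1 + 1 else s.1
  min ans 2

-- ===== PORT B =====
-- Source B's drop_while helper (a while loop advancing past elements satisfying pred)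
def pvDrop (p : Int → Bool) : List Int → List Int
  | [] => []
  | x :: t => if p x then pvDrop p t else x :: t

def arrayOperations_alt (n : Int) (arr : List Int) : Int :=
  let seg := PySem.List.slice arr none (some (max n 0))
  let t := pvDrop (fun x => x == 0) seg
  if t = [] then 0
  else
    let t2 := pvDrop (fun x => x == 0) (pvDrop (fun x => x != 0) t)
    if t2 = [] then 1 else 2

-- ===== PRECONDITION & SPEC =====
-- A indexes arr[i] for every i in range(n): it raises IndexError when n > len(arr).
def Pre_arrayOperations (n : Int) (arr : List Int) : Prop := n ≤ (arr.length : Int)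
instance (n : Int) (arr : List Int) : Decidable (Pre_arrayOperations n arr) := by unfold Pre_arrayOperations; infer_instance
def pvWitness_arrayOperations : Int × List Int := (3, [1, 0, 2])

def Spec_arrayOperations (n : Int) (arr : List Int) (out : Int) : Prop := out = arrayOperations_alt n arr
instance (n : Int) (arr : List Int) (out : Int) : Decidable (Spec_arrayOperations n arr out) := by unfold Spec_arrayOperations; infer_instance

-- ===== CLAIM (what is proved, stated in full; the proofs are below) =====
def Claim_equal_arrayOperations : Prop := ∀ (n : Int) (arr : List Int), Dom_arrayOperations n arr → Pre_arrayOperations n arr → Spec_arrayOperations n arr (arrayOperations n arr)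

-- ===== LEMMAS AND PROOFS =====

-- number of maximal non-zero runs of the list, given whether we are currently inside a run
def pvRuns : Bool → List Int → Int
  | _, [] => 0
  | inRun, x :: t => (if x ≠ 0 ∧ inRun = false then 1 else 0) + pvRuns (decide (x ≠ 0)) t

-- A's loop body, on (index, element) pairs
def pvStep (st : Int × Int) (q : Int × Int) : Int × Int :=
  if q.2 == 0 then ((if q.1 > st.2 then st.1 + 1 else st.1), q.1 + 1) else st

-- A's trailing fix-up
def pvFin (N : Int) (s : Int × Int) : Int := if s.2 < N then s.1 + 1 else s.1

lemma pvA_fold (xs : List Int) : ∀ (i0 ans l : Int), l ≤ i0 →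
    pvFin (i0 + (xs.length : Int)) ((PySem.List.enumerate xs i0).foldl pvStep (ans, l))
    = ans + (if l < i0 then 1 else 0) + pvRuns (decide (l < i0)) xs := by
  induction xs with
  | nil =>
    intro i0 ans l hl
    simp only [PySem.List.enumerate, pvRuns, pvFin, List.length_nil, Int.natCast_zero, add_zero,
      List.foldl_nil]
    split_ifs <;> omega
  | cons x t ih =>
    intro i0 ans l hl
    have hcons : PySem.List.enumerate (x :: t) i0 = (i0, x) :: PySem.List.enumerate t (i0 + 1) := by
      simp [PySem.List.enumerate]
    have hlen : i0 + ((x :: t).length : Int) = (i0 + 1) + (t.length : Int) := by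
      simp [List.length_cons]; ring
    rw [hcons, List.foldl_cons, hlen]
    by_cases hx : x = 0
    · have hstep : pvStep (ans, l) (i0, x) = ((if i0 > l then ans + 1 else ans), i0 + 1) := by
        simp [pvStep, hx]
      rw [hstep, ih (i0 + 1) _ (i0 + 1) le_rfl]
      simp only [pvRuns, hx]
      split_ifs <;> (simp; try omega)
    · have hstep : pvStep (ans, l) (i0, x) = (ans, l) := by
        simp [pvStep, hx]
      rw [hstep, ih (i0 + 1) ans l (by omega)]
      have h1 : (l < i0 + 1) = True := by simp; omega
      simp only [pvRuns, h1, if_true, decide_true]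
      by_cases hli : l < i0 <;> (simp [hli, hx]; try omega)

-- pyGetD into arr agrees with pyGetD into a long-enough prefix of arr
lemma pvGetD_take (arr : List Int) (m : Nat) (i : Int) (h0 : 0 ≤ i) (h1 : i < (m : Int))
    (hm : m ≤ arr.length) :
    PySem.List.pyGetD arr i 0 = PySem.List.pyGetD (arr.take m) i 0 := by
  have hi : i.toNat < m := by omega
  have hL : (arr.take m).length = m := by simp [List.length_take]; omega
  rw [PySem.List.pyGetD_eq_getElem (h0 := h0) (h1 := by omega),
      PySem.List.pyGetD_eq_getElem (h0 := h0) (h1 := by rw [hL]; omega)]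
  simp [List.getElem_take]

lemma pvRuns_nonneg (xs : List Int) : ∀ b, 0 ≤ pvRuns b xs := by
  induction xs with
  | nil => intro b; simp [pvRuns]
  | cons x t ih => intro b; simp only [pvRuns]; have := ih (decide (x ≠ 0)); split_ifs <;> omega

lemma pvDrop_head_false (p : Int → Bool) (xs : List Int) :
    ∀ y ys, pvDrop p xs = y :: ys → p y = false := by
  induction xs with
  | nil => intro y ys h; simp [pvDrop] at h
  | cons x t ih =>
    intro y ys h
    by_cases hp : p x = true
    · exact ih y ys (by simpa [pvDrop, hp] using h)
    · simp only [pvDrop, hp, Bool.false_eq_true, reduceIte] at h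
      simp only [Bool.not_eq_true] at hp
      obtain ⟨rfl, rfl⟩ := by
        simpa using h
      exact hp

lemma pvRuns_dropZero (xs : List Int) :
    pvRuns false xs = pvRuns false (pvDrop (fun x => x == 0) xs) := by
  induction xs with
  | nil => simp [pvDrop]
  | cons x t ih =>
    by_cases hx : x = 0
    · simp [pvDrop, pvRuns, hx, ih]
    · simp [pvDrop, hx]

lemma pvRuns_dropNZ (xs : List Int) :
    pvRuns true xs = pvRuns true (pvDrop (fun x => x != 0) xs) := by
  induction xs with
  | nil => simp [pvDrop]
  | cons x t ih =>
    by_cases hx : x = 0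
    · simp [pvDrop, hx]
    · simp [pvDrop, pvRuns, hx, ih]

-- the core equality: the counter-with-cap equals the three-stage classification
lemma pvB_core (xs : List Int) :
    min (pvRuns false xs) 2 =
      (let t := pvDrop (fun x => x == 0) xs
       if t = [] then 0
       else
         let t2 := pvDrop (fun x => x == 0) (pvDrop (fun x => x != 0) t)
         if t2 = [] then (1 : Int) else 2) := by
  rw [pvRuns_dropZero]
  cases ht : pvDrop (fun x => x == 0) xs with
  | nil => simp [pvRuns]
  | cons x r =>
    have hx : x ≠ 0 := by
      have := pvDrop_head_false (fun x => x == 0) xs x r ht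
      simpa using this
    have h1 : pvRuns false (x :: r) = 1 + pvRuns true r := by
      simp [pvRuns, hx]
    have hdr : pvDrop (fun x => x != 0) (x :: r) = pvDrop (fun x => x != 0) r := by
      simp [pvDrop, hx]
    have h2 : pvRuns true r = pvRuns true (pvDrop (fun x => x != 0) r) := pvRuns_dropNZ r
    rw [h1, if_neg (List.cons_ne_nil x r), hdr]
    cases hu : pvDrop (fun x => x != 0) r with
    | nil =>
      rw [h2, hu]
      simp [pvRuns, pvDrop]
    | cons y v =>
      have hy : y = 0 := by
        have := pvDrop_head_false (fun x => x != 0) r y v hu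
        simpa using this
      subst hy
      have h3 : pvRuns true ((0 : Int) :: v) = pvRuns false v := by simp [pvRuns]
      have hdz : pvDrop (fun x => x == 0) ((0 : Int) :: v) = pvDrop (fun x => x == 0) v := by
        simp [pvDrop]
      rw [h2, hu, h3, pvRuns_dropZero v, hdz]
      cases ht2 : pvDrop (fun x => x == 0) v with
      | nil => simp [pvRuns]
      | cons z w =>
        have hz : z ≠ 0 := by
          have := pvDrop_head_false (fun x => x == 0) v z w ht2
          simpa using this
        have h4 : pvRuns false (z :: w) = 1 + pvRuns true w := by simp [pvRuns, hz]
        have h5 := pvRuns_nonneg w true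
        rw [h4, if_neg (List.cons_ne_nil z w)]
        omega

-- ===== VERDICT (by name: the statement is the Claim_ definition above) =====
theorem arrayOperations_spec : Claim_equal_arrayOperations := by
  intro n arr _ hpre
  unfold Spec_arrayOperations
  by_cases hn : n ≤ 0
  · have hmax : max n 0 = 0 := by omega
    have hr : PySem.List.pyRange 0 n 1 = [] := PySem.List.pyRange_one_eq_nil hn
    have hs : PySem.List.slice arr none (some (0 : Int)) = arr.take (0 : Int).toNat :=
      PySem.List.slice_to arr le_rfl
    simp only [arrayOperations, arrayOperations_alt, hmax, hr, hs, List.foldl_nil]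
    simp [pvDrop]
    omega
  · have hn0 : (0 : Int) < n := by omega
    have hmlen : n.toNat ≤ arr.length := Int.toNat_le.mpr hpre
    set xs := arr.take n.toNat with hxs
    have hxlen : (xs.length : Int) = n := by
      rw [hxs]; simp [List.length_take]; omega
    have hfold : (PySem.List.pyRange 0 n 1).foldl
        (fun st i => pvStep st (i, PySem.List.pyGetD arr i 0)) ((0 : Int), (0 : Int))
        = (PySem.List.enumerate xs 0).foldl pvStep (0, 0) := by
      rw [PySem.List.enumerate_eq_map_pyRange xs 0, List.foldl_map]
      have hlen2 : PySem.List.len xs = n := by simp [hxlen]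
      rw [hlen2]
      refine PySem.List.foldl_congr_mem _ _ _ _ ?_
      intro acc i hi
      have hmem := (PySem.List.mem_pyRange_one).mp hi
      rw [pvGetD_take arr n.toNat i hmem.1 (by omega) hmlen]
    have eqA : arrayOperations n arr
        = min (pvFin n ((PySem.List.enumerate xs 0).foldl pvStep (0, 0))) 2 := by
      rw [← hfold]; rfl
    have hA : pvFin n ((PySem.List.enumerate xs 0).foldl pvStep (0, 0)) = pvRuns false xs := by
      have h := pvA_fold xs 0 0 0 le_rfl
      rw [hxlen] at h
      simpa using h
    have eqB : arrayOperations_alt n arr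
        = (let t := pvDrop (fun x => x == 0) xs
           if t = [] then 0
           else
             let t2 := pvDrop (fun x => x == 0) (pvDrop (fun x => x != 0) t)
             if t2 = [] then (1 : Int) else 2) := by
      have hmax : max n 0 = n := by omega
      have hs : PySem.List.slice arr none (some n) = arr.take n.toNat :=
        PySem.List.slice_to arr (by omega)
      simp only [arrayOperations_alt, hmax, hs, ← hxs]
    rw [eqA, hA, eqB, pvB_core]
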